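-- pv_equiv track=rewrite | github.com/Devananth1302/Digital-pulse | backend/adapters/analytics_adapter.py | _extract_engagement
-- ===== SOURCE A (Python) =====
-- def _extract_engagement(data: dict) -> dict:
--     """Extract engagement metrics from various field names."""
--     engagement = {
--         "likes": 0,
--         "shares": 0,
--         "comments": 0,
--         "views": 0,
--     }
--
--     # Map common variants
--     likes_fields = ["likes", "upvotes", "favourites", "positive_reactions"]
--     shares_fields = ["shares", "retweets", "reblogs"]
--     comments_fields = ["comments", "replies", "responses", "discussions"]
--     views_fields = ["views", "impressions", "reach", "page_views"]
--
--     for field in likes_fields: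
--         if field in data and data[field]:
--             engagement["likes"] = int(data[field])
--             break
--
--     for field in shares_fields:
--         if field in data and data[field]:
--             engagement["shares"] = int(data[field])
--             break
--
--     for field in comments_fields:
--         if field in data and data[field]:
--             engagement["comments"] = int(data[field])
--             break
--
--     for field in views_fields:
--         if field in data and data[field]:
--             engagement["views"] = int(data[field])
--             break
--
--     return engagement
-- ===== SOURCE B (Python) =====
-- _METRIC_FIELDS = [
--     ("likes", ["likes", "upvotes", "favourites", "positive_reactions"]),
--     ("shares", ["shares", "retweets", "reblogs"]),
--     ("comments", ["comments", "replies", "responses", "discussions"]),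
--     ("views", ["views", "impressions", "reach", "page_views"]),
-- ]
--
-- # Inverted index: variant field name -> (metric, priority in the variant list)
-- _FIELD_INDEX = {
--     field: (metric, pos)
--     for metric, fields in _METRIC_FIELDS
--     for pos, field in enumerate(fields)
-- }
--
--
-- def _extract_engagement(data: dict) -> dict:
--     """Extract engagement metrics from various field names."""
--     # Single pass over the data: keep, per metric, the truthy variant with the
--     # smallest priority (= the first one A's per-metric scan would have taken).
--     best = {}
--     for key, value in data.items():
--         hit = _FIELD_INDEX.get(key)
--         if hit is not None and value:
--             metric, pos = hit
--             cur = best.get(metric)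
--             if cur is None or pos < cur[0]:
--                 best[metric] = (pos, int(value))
--     return {metric: best[metric][1] if metric in best else 0
--             for metric, _ in _METRIC_FIELDS}
-- ===== Notes on version B (the rewrite author's own statement) =====
-- stated objective: alternative
-- what changed: Replaces A's four per-metric scans of variant-field lists with dict lookups by an inverted index (field -> (metric, priority)) and a single pass over the data items that keeps, per metric, the truthy value of smallest priority.
import Mathlib
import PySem

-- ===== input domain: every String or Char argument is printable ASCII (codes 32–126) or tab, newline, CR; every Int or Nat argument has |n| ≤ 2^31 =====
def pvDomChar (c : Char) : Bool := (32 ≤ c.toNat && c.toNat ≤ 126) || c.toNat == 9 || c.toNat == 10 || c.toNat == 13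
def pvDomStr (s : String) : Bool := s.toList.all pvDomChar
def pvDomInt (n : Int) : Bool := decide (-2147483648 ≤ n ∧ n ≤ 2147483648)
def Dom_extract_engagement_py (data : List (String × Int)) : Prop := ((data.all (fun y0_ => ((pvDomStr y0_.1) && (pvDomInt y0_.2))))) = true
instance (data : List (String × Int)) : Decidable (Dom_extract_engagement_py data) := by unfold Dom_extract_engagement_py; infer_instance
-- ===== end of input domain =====

-- B replaces A's four per-metric scans of the variant-field lists (dict lookups per field) by an
-- inverted index field -> (metric, priority) and ONE pass over the data items keeping, per metric,
-- the truthy value of smallest priority; same cost, different traversal.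


-- ===== PORT A =====
-- one 'for field in fields: if field in data and data[field]: engagement[key] = int(data[field]); break' loop
def loopA (d : PySem.Dict String Int) (key : String) :
    List String → PySem.Dict String Int → PySem.Dict String Int
  | [], eng => eng
  | f :: rest, eng =>
    if d.contains f && decide (d.getD f 0 ≠ 0) then eng.insert key (d.getD f 0)
    else loopA d key rest eng

def extract_engagement_py (data : List (String × Int)) : List (String × Int) :=
  let d := PySem.Dict.ofList data
  let engagement : PySem.Dict String Int :=
    PySem.Dict.ofList [("likes", 0), ("shares", 0), ("comments", 0), ("views", 0)]
  let likes_fields := ["likes", "upvotes", "favourites", "positive_reactions"]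
  let shares_fields := ["shares", "retweets", "reblogs"]
  let comments_fields := ["comments", "replies", "responses", "discussions"]
  let views_fields := ["views", "impressions", "reach", "page_views"]
  let engagement := loopA d "likes" likes_fields engagement
  let engagement := loopA d "shares" shares_fields engagement
  let engagement := loopA d "comments" comments_fields engagement
  let engagement := loopA d "views" views_fields engagement
  engagement.items

-- ===== PORT B =====
-- _METRIC_FIELDS
def metricFields : List (String × List String) :=
  [("likes", ["likes", "upvotes", "favourites", "positive_reactions"]),
   ("shares", ["shares", "retweets", "reblogs"]),
   ("comments", ["comments", "replies", "responses", "discussions"]),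
   ("views", ["views", "impressions", "reach", "page_views"])]

-- _FIELD_INDEX: {field: (metric, pos) for metric, fields in _METRIC_FIELDS for pos, field in enumerate(fields)}
def fieldIndex : PySem.Dict String (String × Int) :=
  metricFields.foldl
    (fun idx p => (PySem.List.enumerate p.2).foldl
      (fun idx2 q => idx2.insert q.2 (p.1, q.1)) idx)
    PySem.Dict.empty

-- body of B's 'for key, value in data.items()' loop
def bStep (best : PySem.Dict String (Int × Int)) (kv : String × Int) :
    PySem.Dict String (Int × Int) :=
  match fieldIndex.get? kv.1 with
  | none => best
  | some (metric, pos) =>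
    if kv.2 ≠ 0 then
      match best.get? metric with
      | none => best.insert metric (pos, kv.2)
      | some cur => if pos < cur.1 then best.insert metric (pos, kv.2) else best
    else best

def extract_engagement_py_alt (data : List (String × Int)) : List (String × Int) :=
  let d := PySem.Dict.ofList data
  let best := d.items.foldl bStep PySem.Dict.empty
  metricFields.map (fun p =>
    (p.1, match best.get? p.1 with | some c => c.2 | none => 0))

-- ===== PRECONDITION & SPEC =====
def Spec_extract_engagement_py (data : List (String × Int)) (out : List (String × Int)) : Prop := out = extract_engagement_py_alt data
instance (data : List (String × Int)) (out : List (String × Int)) : Decidable (Spec_extract_engagement_py data out) := by unfold Spec_extract_engagement_py; infer_instance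

-- ===== CLAIM (what is proved, stated in full; the proofs are below) =====
def Claim_equal_extract_engagement_py : Prop := ∀ (data : List (String × Int)), Dom_extract_engagement_py data → Spec_extract_engagement_py data (extract_engagement_py data)

-- ===== LEMMAS AND PROOFS =====

-- the candidate an item kv contributes for metric m: its (priority, value) if kv's key is one of
-- m's variants and kv's value is truthy
def cand (m : String) (kv : String × Int) : Option (Int × Int) :=
  match fieldIndex.get? kv.1 with
  | some (m', pos) => if m' = m ∧ kv.2 ≠ 0 then some (pos, kv.2) else none
  | none => none

-- B's loop body, observed at a single metric key
def sStep (m : String) (o : Option (Int × Int)) (kv : String × Int) : Option (Int × Int) :=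
  match cand m kv with
  | none => o
  | some c => match o with
    | none => some c
    | some cur => if c.1 < cur.1 then some c else o

theorem bStep_get? (b : PySem.Dict String (Int × Int)) (kv : String × Int) (m : String) :
    (bStep b kv).get? m = sStep m (b.get? m) kv := by
  unfold bStep sStep cand
  cases h : fieldIndex.get? kv.1 with
  | none => rfl
  | some mp =>
    obtain ⟨m', pos⟩ := mp
    by_cases hv : kv.2 = 0
    · simp [hv]
    · by_cases hm : m' = m
      · subst hm
        cases hb : b.get? m' with
        | none => simp [hv, hb, PySem.Dict.get?_insert_self]
        | some cur =>
          by_cases hp : pos < cur.1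
          · simp [hv, hb, hp, PySem.Dict.get?_insert_self]
          · simp [hv, hb, hp]
      · have hne : m ≠ m' := fun hh => hm hh.symm
        cases hb : b.get? m' with
        | none => simp [hv, hm, hb, PySem.Dict.get?_insert_of_ne _ _ hne]
        | some cur =>
          by_cases hp : pos < cur.1
          · simp [hv, hm, hb, hp, PySem.Dict.get?_insert_of_ne _ _ hne]
          · simp [hv, hm, hb, hp]

theorem foldl_bStep_get? (L : List (String × Int)) (b : PySem.Dict String (Int × Int)) (m : String) :
    (L.foldl bStep b).get? m = L.foldl (sStep m) (b.get? m) := by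
  induction L generalizing b with
  | nil => rfl
  | cons kv L ih => simp only [List.foldl_cons, ih, bStep_get?]

-- fold-spec lemmas for the scalar fold
theorem sfold_none (m : String) (L : List (String × Int)) :
    ∀ (o : Option (Int × Int)), L.foldl (sStep m) o = none →
      o = none ∧ ∀ kv ∈ L, cand m kv = none := by
  induction L with
  | nil => intro o h; exact ⟨h, by simp⟩
  | cons kv L ih =>
    intro o h
    rw [List.foldl_cons] at h
    obtain ⟨h1, h2⟩ := ih _ h
    unfold sStep at h1
    have hc : cand m kv = none ∧ o = none := by
      cases hcv : cand m kv with
      | none => rw [hcv] at h1; exact ⟨rfl, h1⟩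
      | some c =>
        exfalso
        rw [hcv] at h1
        cases o with
        | none => cases h1
        | some cur =>
          dsimp only at h1
          split at h1 <;> cases h1
    refine ⟨hc.2, ?_⟩
    intro x hx
    rcases List.mem_cons.mp hx with hx | hx
    · exact hx ▸ hc.1
    · exact h2 x hx

theorem sfold_all_none (m : String) (L : List (String × Int))
    (h : ∀ kv ∈ L, cand m kv = none) : L.foldl (sStep m) none = none := by
  induction L with
  | nil => rfl
  | cons kv L ih =>
    have h1 : cand m kv = none := h kv List.mem_cons_self
    rw [List.foldl_cons]
    have hstep : sStep m none kv = none := by unfold sStep; rw [h1]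
    rw [hstep]
    exact ih (fun x hx => h x (List.mem_cons_of_mem _ hx))

theorem sfold_some (m : String) (L : List (String × Int)) :
    ∀ (o : Option (Int × Int)) (c : Int × Int), L.foldl (sStep m) o = some c →
      (o = some c ∨ ∃ kv ∈ L, cand m kv = some c) ∧
      (∀ c', o = some c' → c.1 ≤ c'.1) ∧
      (∀ kv ∈ L, ∀ c', cand m kv = some c' → c.1 ≤ c'.1) := by
  induction L with
  | nil =>
    intro o c h
    rw [List.foldl_nil] at h
    refine ⟨Or.inl h, fun c' h' => ?_, by simp⟩
    rw [h] at h'; cases h'; rfl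
  | cons kv L ih =>
    intro o c h
    rw [List.foldl_cons] at h
    obtain ⟨h1, h2, h3⟩ := ih _ _ h
    unfold sStep at h1 h2
    cases hcv : cand m kv with
    | none =>
      rw [hcv] at h1 h2
      refine ⟨?_, h2, ?_⟩
      · rcases h1 with h1 | ⟨x, hx, hcx⟩
        · exact Or.inl h1
        · exact Or.inr ⟨x, List.mem_cons_of_mem _ hx, hcx⟩
      · intro x hx c' hc'
        rcases List.mem_cons.mp hx with hx | hx
        · rw [hx, hcv] at hc'; cases hc'
        · exact h3 x hx c' hc'
    | some cd =>
      rw [hcv] at h1 h2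
      cases o with
      | none =>
        dsimp only at h1 h2
        refine ⟨Or.inr ?_, by simp, ?_⟩
        · rcases h1 with h1 | ⟨x, hx, hcx⟩
          · exact ⟨kv, List.mem_cons_self, by rw [hcv, h1]⟩
          · exact ⟨x, List.mem_cons_of_mem _ hx, hcx⟩
        · intro x hx c' hc'
          rcases List.mem_cons.mp hx with hx | hx
          · rw [hx, hcv] at hc'
            cases hc'
            exact h2 cd rfl
          · exact h3 x hx c' hc'
      | some cur =>
        dsimp only at h1 h2
        by_cases hp : cd.1 < cur.1
        · rw [if_pos hp] at h1 h2
          refine ⟨?_, fun c' h' => ?_, ?_⟩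
          · rcases h1 with h1 | ⟨x, hx, hcx⟩
            · exact Or.inr ⟨kv, List.mem_cons_self, by rw [hcv, h1]⟩
            · exact Or.inr ⟨x, List.mem_cons_of_mem _ hx, hcx⟩
          · cases h'
            exact le_of_lt (lt_of_le_of_lt (h2 cd rfl) hp)
          · intro x hx c' hc'
            rcases List.mem_cons.mp hx with hx | hx
            · rw [hx, hcv] at hc'
              cases hc'
              exact h2 cd rfl
            · exact h3 x hx c' hc'
        · rw [if_neg hp] at h1 h2
          refine ⟨?_, h2, ?_⟩
          · rcases h1 with h1 | ⟨x, hx, hcx⟩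
            · exact Or.inl h1
            · exact Or.inr ⟨x, List.mem_cons_of_mem _ hx, hcx⟩
          · intro x hx c' hc'
            rcases List.mem_cons.mp hx with hx | hx
            · rw [hx, hcv] at hc'
              cases hc'
              exact le_trans (h2 cur rfl) (le_of_not_gt hp)
            · exact h3 x hx c' hc'

-- the value B reads off a best-entry
def valOf (o : Option (Int × Int)) : Int :=
  match o with | some c => c.2 | none => 0

-- what A's one for/break loop computes: the value of the first present truthy field
def firstTruthy (d : PySem.Dict String Int) : List String → Int
  | [] => 0
  | f :: rest =>
    if d.contains f && decide (d.getD f 0 ≠ 0) then d.getD f 0 else firstTruthy d rest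

-- A's for/break loop either finds the first truthy field (and inserts it) or leaves eng unchanged.
theorem loopA_eq (d : PySem.Dict String Int) (key : String) (fields : List String)
    (eng : PySem.Dict String Int) :
    loopA d key fields eng =
      if firstTruthy d fields = 0 then eng else eng.insert key (firstTruthy d fields) := by
  induction fields with
  | nil => simp [loopA, firstTruthy]
  | cons f rest ih =>
    rw [loopA, firstTruthy]
    by_cases h : (d.contains f && decide (d.getD f 0 ≠ 0)) = true
    · have hv : d.getD f 0 ≠ 0 := by
        have := h; simp only [Bool.and_eq_true, decide_eq_true_eq] at this; exact this.2
      rw [if_pos h, if_pos h, if_neg hv]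
    · rw [if_neg h, if_neg h, ih]

-- the inverted index, as the literal association list the two Python loops build
def fieldIndexList : List (String × (String × Int)) :=
  [("likes", ("likes", 0)), ("upvotes", ("likes", 1)), ("favourites", ("likes", 2)), ("positive_reactions", ("likes", 3)),
   ("shares", ("shares", 0)), ("retweets", ("shares", 1)), ("reblogs", ("shares", 2)),
   ("comments", ("comments", 0)), ("replies", ("comments", 1)), ("responses", ("comments", 2)), ("discussions", ("comments", 3)),
   ("views", ("views", 0)), ("impressions", ("views", 1)), ("reach", ("views", 2)), ("page_views", ("views", 3))]

set_option maxHeartbeats 2000000 in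
theorem fieldIndex_eq : fieldIndex = PySem.Dict.mk fieldIndexList := by rfl

theorem fieldIndex_mem (k : String) (mp : String × Int) (h : fieldIndex.get? k = some mp) :
    (k, mp) ∈ fieldIndexList := by
  have hm := PySem.Dict.mem_items_of_get?_eq_some (d := fieldIndex) h
  rwa [fieldIndex_eq] at hm

-- the truthiness test of A's loop, restated on the items of d
theorem cond_iff (d : PySem.Dict String Int) (hnd : d.keys.Nodup) (f : String) :
    (d.contains f && decide (d.getD f 0 ≠ 0)) = true ↔
      ((f, d.getD f 0) ∈ d.items ∧ d.getD f 0 ≠ 0) := by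
  constructor
  · rintro h
    simp only [Bool.and_eq_true, decide_eq_true_eq] at h
    obtain ⟨hc, hv⟩ := h
    rw [PySem.Dict.contains_eq_isSome_get?] at hc
    cases hg : d.get? f with
    | none => rw [hg] at hc; cases hc
    | some v =>
      have hD : d.getD f 0 = v := PySem.Dict.getD_of_get?_eq_some d 0 hg
      exact ⟨hD ▸ PySem.Dict.mem_items_of_get?_eq_some d hg, hv⟩
  · rintro ⟨hm, hv⟩
    have hg : d.get? f = some (d.getD f 0) := PySem.Dict.get?_of_mem_items d hm hnd
    have hc : d.contains f = true := by rw [PySem.Dict.contains_eq_isSome_get?, hg]; rfl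
    simp [hc, hv]

-- generic per-metric correctness of B's single pass, by walking down A's field list
theorem metric_fold_aux (d : PySem.Dict String Int) (hnd : d.keys.Nodup)
    (m : String) (fs : List String)
    (Hc : ∀ (kv : String × Int) (c : Int × Int), cand m kv = some c →
      kv.2 ≠ 0 ∧ c.2 = kv.2 ∧ ∃ n : Nat, fs[n]? = some kv.1 ∧ c.1 = (n : Int))
    (Hr : ∀ (n : Nat) (f : String) (v : Int), fs[n]? = some f → v ≠ 0 →
      cand m (f, v) = some ((n : Int), v)) :
    ∀ (fs' : List String) (j : Nat), fs.drop j = fs' →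
      (∀ (n : Nat), n < j → ∀ f, fs[n]? = some f →
        ¬((f, d.getD f 0) ∈ d.items ∧ d.getD f 0 ≠ 0)) →
      valOf (d.items.foldl (sStep m) none) = firstTruthy d fs' := by
  intro fs'
  induction fs' with
  | nil =>
    intro j hdrop hprev
    have hlen : fs.length ≤ j := by
      by_contra hlt
      push Not at hlt
      have : fs.drop j ≠ [] := by
        intro h
        have := List.drop_eq_nil_iff.mp h
        omega
      exact this hdrop
    have hall : ∀ kv ∈ d.items, cand m kv = none := by
      intro kv hkv
      cases hcv : cand m kv with
      | none => rfl
      | some c =>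
        exfalso
        obtain ⟨hv, _, n, hn, _⟩ := Hc kv c hcv
        have hnlt : n < fs.length := by
          by_contra hge
          push Not at hge
          rw [List.getElem?_eq_none hge] at hn
          cases hn
        have hget : d.get? kv.1 = some kv.2 := by
          obtain ⟨k, v⟩ := kv
          exact PySem.Dict.get?_of_mem_items d hkv hnd
        have hD : d.getD kv.1 0 = kv.2 := PySem.Dict.getD_of_get?_eq_some d 0 hget
        exact hprev n (by omega) kv.1 hn ⟨by rw [hD]; exact hkv, by rw [hD]; exact hv⟩
    rw [sfold_all_none m d.items hall]
    rfl
  | cons f fs' ih =>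
    intro j hdrop hprev
    have hj : fs[j]? = some f := by
      have h0 : (fs.drop j)[0]? = fs[j + 0]? := List.getElem?_drop
      rw [hdrop] at h0
      simpa using h0.symm
    have hdrop' : fs.drop (j + 1) = fs' := by
      have : fs.drop (j + 1) = (fs.drop j).drop 1 := by
        rw [List.drop_drop]
      rw [this, hdrop]
      rfl
    rw [firstTruthy]
    by_cases hcond : (d.contains f && decide (d.getD f 0 ≠ 0)) = true
    · rw [if_pos hcond]
      obtain ⟨hmem, hv⟩ := (cond_iff d hnd f).mp hcond
      have hcf : cand m (f, d.getD f 0) = some ((j : Int), d.getD f 0) :=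
        Hr j f (d.getD f 0) hj hv
      -- the fold cannot be none
      cases hres : d.items.foldl (sStep m) none with
      | none =>
        exfalso
        obtain ⟨-, hall⟩ := sfold_none m d.items none hres
        rw [hall (f, d.getD f 0) hmem] at hcf
        cases hcf
      | some c =>
        obtain ⟨h1, -, h3⟩ := sfold_some m d.items none c hres
        rcases h1 with h1 | ⟨kv, hkv, hckv⟩
        · cases h1
        · obtain ⟨hv', hc2, n, hn, hc1⟩ := Hc kv c hckv
          have hget : d.get? kv.1 = some kv.2 := by
            obtain ⟨k, v⟩ := kv
            exact PySem.Dict.get?_of_mem_items d hkv hnd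
          have hD : d.getD kv.1 0 = kv.2 := PySem.Dict.getD_of_get?_eq_some d 0 hget
          have hle : c.1 ≤ (j : Int) := h3 (f, d.getD f 0) hmem _ hcf
          have hnj : n = j := by
            have h1' : (n : Int) ≤ (j : Int) := hc1 ▸ hle
            have hnlej : n ≤ j := by exact_mod_cast h1'
            by_contra hne
            have hnlt : n < j := by omega
            exact hprev n hnlt kv.1 hn ⟨by rw [hD]; exact hkv, by rw [hD]; exact hv'⟩
          have hkf : kv.1 = f := by
            rw [hnj, hj] at hn
            cases hn
            rfl
          have hkv2 : kv.2 = d.getD f 0 := by rw [← hkf, hD]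
          rw [valOf, hc2, hkv2]
    · rw [if_neg hcond]
      refine ih (j + 1) hdrop' ?_
      intro n hn g hg
      by_cases hnj : n < j
      · exact hprev n hnj g hg
      · have : n = j := by omega
        subst this
        rw [hj] at hg
        cases hg
        exact fun hcontra => hcond ((cond_iff d hnd f).mpr hcontra)

-- lookup facts for the fifteen fields
theorem fi_get_likes : fieldIndex.get? "likes" = some ("likes", 0) := by rw [fieldIndex_eq]; decide
theorem fi_get_upvotes : fieldIndex.get? "upvotes" = some ("likes", 1) := by rw [fieldIndex_eq]; decide
theorem fi_get_favourites : fieldIndex.get? "favourites" = some ("likes", 2) := by rw [fieldIndex_eq]; decide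
theorem fi_get_positive : fieldIndex.get? "positive_reactions" = some ("likes", 3) := by rw [fieldIndex_eq]; decide
theorem fi_get_shares : fieldIndex.get? "shares" = some ("shares", 0) := by rw [fieldIndex_eq]; decide
theorem fi_get_retweets : fieldIndex.get? "retweets" = some ("shares", 1) := by rw [fieldIndex_eq]; decide
theorem fi_get_reblogs : fieldIndex.get? "reblogs" = some ("shares", 2) := by rw [fieldIndex_eq]; decide
theorem fi_get_comments : fieldIndex.get? "comments" = some ("comments", 0) := by rw [fieldIndex_eq]; decide
theorem fi_get_replies : fieldIndex.get? "replies" = some ("comments", 1) := by rw [fieldIndex_eq]; decide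
theorem fi_get_responses : fieldIndex.get? "responses" = some ("comments", 2) := by rw [fieldIndex_eq]; decide
theorem fi_get_discussions : fieldIndex.get? "discussions" = some ("comments", 3) := by rw [fieldIndex_eq]; decide
theorem fi_get_views : fieldIndex.get? "views" = some ("views", 0) := by rw [fieldIndex_eq]; decide
theorem fi_get_impressions : fieldIndex.get? "impressions" = some ("views", 1) := by rw [fieldIndex_eq]; decide
theorem fi_get_reach : fieldIndex.get? "reach" = some ("views", 2) := by rw [fieldIndex_eq]; decide
theorem fi_get_page_views : fieldIndex.get? "page_views" = some ("views", 3) := by rw [fieldIndex_eq]; decide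

-- Hc for one metric: a candidate's position names one of that metric's variant fields
theorem Hc_of (m : String) (fs : List String)
    (hinv : ∀ (k : String) (m' : String) (pos : Int),
      (k, (m', pos)) ∈ fieldIndexList → m' = m → ∃ n : Nat, fs[n]? = some k ∧ pos = (n : Int)) :
    ∀ (kv : String × Int) (c : Int × Int), cand m kv = some c →
      kv.2 ≠ 0 ∧ c.2 = kv.2 ∧ ∃ n : Nat, fs[n]? = some kv.1 ∧ c.1 = (n : Int) := by
  intro kv c hc
  unfold cand at hc
  cases hix : fieldIndex.get? kv.1 with
  | none => rw [hix] at hc; cases hc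
  | some mp =>
    obtain ⟨m', pos⟩ := mp
    rw [hix] at hc
    dsimp only at hc
    by_cases hcnd : m' = m ∧ kv.2 ≠ 0
    · rw [if_pos hcnd] at hc
      cases hc
      obtain ⟨n, hn, hp⟩ := hinv kv.1 m' pos (fieldIndex_mem kv.1 (m', pos) hix) hcnd.1
      exact ⟨hcnd.2, rfl, n, hn, hp⟩
    · rw [if_neg hcnd] at hc
      cases hc

theorem hinv_likes : ∀ (k : String) (m' : String) (pos : Int),
    (k, (m', pos)) ∈ fieldIndexList → m' = "likes" →
    ∃ n : Nat, (["likes", "upvotes", "favourites", "positive_reactions"])[n]? = some k ∧ pos = (n : Int) := by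
  intro k m' pos hmem hm
  subst hm
  simp only [fieldIndexList, List.mem_cons, List.not_mem_nil, or_false, Prod.mk.injEq] at hmem
  rcases hmem with ⟨h1, h2, h3⟩|⟨h1, h2, h3⟩|⟨h1, h2, h3⟩|⟨h1, h2, h3⟩|h|h|h|h|h|h|h|h|h|h|h <;>
    first
    | (subst h1; subst h3; first | exact ⟨0, rfl, by simp⟩ | exact ⟨1, rfl, by simp⟩ | exact ⟨2, rfl, by simp⟩ | exact ⟨3, rfl, by simp⟩)
    | simp_all

theorem hinv_shares : ∀ (k : String) (m' : String) (pos : Int),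
    (k, (m', pos)) ∈ fieldIndexList → m' = "shares" →
    ∃ n : Nat, (["shares", "retweets", "reblogs"])[n]? = some k ∧ pos = (n : Int) := by
  intro k m' pos hmem hm
  subst hm
  simp only [fieldIndexList, List.mem_cons, List.not_mem_nil, or_false, Prod.mk.injEq] at hmem
  rcases hmem with h|h|h|h|⟨h1, h2, h3⟩|⟨h1, h2, h3⟩|⟨h1, h2, h3⟩|h|h|h|h|h|h|h|h <;>
    first
    | (subst h1; subst h3; first | exact ⟨0, rfl, by simp⟩ | exact ⟨1, rfl, by simp⟩ | exact ⟨2, rfl, by simp⟩)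
    | simp_all

theorem hinv_comments : ∀ (k : String) (m' : String) (pos : Int),
    (k, (m', pos)) ∈ fieldIndexList → m' = "comments" →
    ∃ n : Nat, (["comments", "replies", "responses", "discussions"])[n]? = some k ∧ pos = (n : Int) := by
  intro k m' pos hmem hm
  subst hm
  simp only [fieldIndexList, List.mem_cons, List.not_mem_nil, or_false, Prod.mk.injEq] at hmem
  rcases hmem with h|h|h|h|h|h|h|⟨h1, h2, h3⟩|⟨h1, h2, h3⟩|⟨h1, h2, h3⟩|⟨h1, h2, h3⟩|h|h|h|h <;>
    first
    | (subst h1; subst h3; first | exact ⟨0, rfl, by simp⟩ | exact ⟨1, rfl, by simp⟩ | exact ⟨2, rfl, by simp⟩ | exact ⟨3, rfl, by simp⟩)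
    | simp_all

theorem hinv_views : ∀ (k : String) (m' : String) (pos : Int),
    (k, (m', pos)) ∈ fieldIndexList → m' = "views" →
    ∃ n : Nat, (["views", "impressions", "reach", "page_views"])[n]? = some k ∧ pos = (n : Int) := by
  intro k m' pos hmem hm
  subst hm
  simp only [fieldIndexList, List.mem_cons, List.not_mem_nil, or_false, Prod.mk.injEq] at hmem
  rcases hmem with h|h|h|h|h|h|h|h|h|h|h|⟨h1, h2, h3⟩|⟨h1, h2, h3⟩|⟨h1, h2, h3⟩|⟨h1, h2, h3⟩ <;>
    first
    | (subst h1; subst h3; first | exact ⟨0, rfl, by simp⟩ | exact ⟨1, rfl, by simp⟩ | exact ⟨2, rfl, by simp⟩ | exact ⟨3, rfl, by simp⟩)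
    | simp_all

-- Hr for each metric: each variant field, with a truthy value, yields its candidate
theorem Hr_likes : ∀ (n : Nat) (f : String) (v : Int),
    (["likes", "upvotes", "favourites", "positive_reactions"])[n]? = some f → v ≠ 0 →
    cand "likes" (f, v) = some ((n : Int), v) := by
  intro n f v h hv
  match n with
  | 0 => simp at h; subst h; simp [cand, fi_get_likes, hv]
  | 1 => simp at h; subst h; simp [cand, fi_get_upvotes, hv]
  | 2 => simp at h; subst h; simp [cand, fi_get_favourites, hv]
  | 3 => simp at h; subst h; simp [cand, fi_get_positive, hv]
  | (n + 4) => simp at h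

theorem Hr_shares : ∀ (n : Nat) (f : String) (v : Int),
    (["shares", "retweets", "reblogs"])[n]? = some f → v ≠ 0 →
    cand "shares" (f, v) = some ((n : Int), v) := by
  intro n f v h hv
  match n with
  | 0 => simp at h; subst h; simp [cand, fi_get_shares, hv]
  | 1 => simp at h; subst h; simp [cand, fi_get_retweets, hv]
  | 2 => simp at h; subst h; simp [cand, fi_get_reblogs, hv]
  | (n + 3) => simp at h

theorem Hr_comments : ∀ (n : Nat) (f : String) (v : Int),
    (["comments", "replies", "responses", "discussions"])[n]? = some f → v ≠ 0 →
    cand "comments" (f, v) = some ((n : Int), v) := by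
  intro n f v h hv
  match n with
  | 0 => simp at h; subst h; simp [cand, fi_get_comments, hv]
  | 1 => simp at h; subst h; simp [cand, fi_get_replies, hv]
  | 2 => simp at h; subst h; simp [cand, fi_get_responses, hv]
  | 3 => simp at h; subst h; simp [cand, fi_get_discussions, hv]
  | (n + 4) => simp at h

theorem Hr_views : ∀ (n : Nat) (f : String) (v : Int),
    (["views", "impressions", "reach", "page_views"])[n]? = some f → v ≠ 0 →
    cand "views" (f, v) = some ((n : Int), v) := by
  intro n f v h hv
  match n with
  | 0 => simp at h; subst h; simp [cand, fi_get_views, hv]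
  | 1 => simp at h; subst h; simp [cand, fi_get_impressions, hv]
  | 2 => simp at h; subst h; simp [cand, fi_get_reach, hv]
  | 3 => simp at h; subst h; simp [cand, fi_get_page_views, hv]
  | (n + 4) => simp at h

-- per-metric value B computes = value A's loop finds
theorem metric_val (d : PySem.Dict String Int) (hnd : d.keys.Nodup)
    (m : String) (fs : List String)
    (Hc : ∀ (kv : String × Int) (c : Int × Int), cand m kv = some c →
      kv.2 ≠ 0 ∧ c.2 = kv.2 ∧ ∃ n : Nat, fs[n]? = some kv.1 ∧ c.1 = (n : Int))
    (Hr : ∀ (n : Nat) (f : String) (v : Int), fs[n]? = some f → v ≠ 0 →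
      cand m (f, v) = some ((n : Int), v)) :
    valOf (d.items.foldl (sStep m) none) = firstTruthy d fs :=
  metric_fold_aux d hnd m fs Hc Hr fs 0 rfl (by omega)

-- ===== VERDICT (by name: the statement is the Claim_ definition above) =====
theorem extract_engagement_py_spec : Claim_equal_extract_engagement_py := by
  intro data _
  unfold Spec_extract_engagement_py extract_engagement_py extract_engagement_py_alt
  have hnd : (PySem.Dict.ofList data).keys.Nodup := PySem.Dict.nodup_keys_ofList data
  have hL := metric_val (PySem.Dict.ofList data) hnd "likes" _
    (Hc_of "likes" _ hinv_likes) Hr_likes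
  have hS := metric_val (PySem.Dict.ofList data) hnd "shares" _
    (Hc_of "shares" _ hinv_shares) Hr_shares
  have hC := metric_val (PySem.Dict.ofList data) hnd "comments" _
    (Hc_of "comments" _ hinv_comments) Hr_comments
  have hV := metric_val (PySem.Dict.ofList data) hnd "views" _
    (Hc_of "views" _ hinv_views) Hr_views
  have hvdef : ∀ o : Option (Int × Int),
      (match o with | some c => c.2 | none => 0) = valOf o := fun o => rfl
  simp only [loopA_eq, metricFields, List.map]
  rw [foldl_bStep_get?, foldl_bStep_get?, foldl_bStep_get?, foldl_bStep_get?]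
  simp only [PySem.Dict.get?_empty, hvdef, hL, hS, hC, hV]
  generalize firstTruthy (PySem.Dict.ofList data) ["likes", "upvotes", "favourites", "positive_reactions"] = L
  generalize firstTruthy (PySem.Dict.ofList data) ["shares", "retweets", "reblogs"] = S
  generalize firstTruthy (PySem.Dict.ofList data) ["comments", "replies", "responses", "discussions"] = C
  generalize firstTruthy (PySem.Dict.ofList data) ["views", "impressions", "reach", "page_views"] = V
  rw [show PySem.Dict.ofList [("likes", (0 : Int)), ("shares", 0), ("comments", 0), ("views", 0)]
      = PySem.Dict.mk [("likes", 0), ("shares", 0), ("comments", 0), ("views", 0)] from rfl]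
  split_ifs <;> simp_all [PySem.Dict.insert]
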